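-- pv_equiv track=rewrite | github.com/philmuhire/complybot | backend/compliance_core/jurisdictions.py | _iter_label_parts
-- ===== SOURCE A (Python) =====
-- def _iter_label_parts(
--     jurisdiction: str | None = None,
--     jurisdictions: list[str] | None = None,
-- ) -> list[str]:
--     """Split comma‑separated strings and expand the list; order preserved, no dedup."""
--     out: list[str] = []
--     for block in [jurisdiction, *(jurisdictions or [])]:
--         if block is None:
--             continue
--         s = str(block).strip()
--         if not s:
--             continue
--         for part in s.split(","):
--             p = part.strip()
--             if p:
--                 out.append(p)
--     return out
-- ===== SOURCE B (Python) =====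
-- def _iter_label_parts(
--     jurisdiction=None,
--     jurisdictions=None,
-- ):
--     """Join all non-None blocks with ',' and tokenize the combined string once."""
--     blocks = [b for b in [jurisdiction, *(jurisdictions or [])] if b is not None]
--     combined = ",".join(str(b) for b in blocks)
--     return [p for p in (t.strip() for t in combined.split(",")) if p]
-- ===== Notes on version B (the rewrite author's own statement) =====
-- stated objective: simpler
-- what changed: Replaced the nested per-block split loops and the empty-block guard by joining all non-None blocks with a comma separator and doing a single split-strip-filter pass over the combined string.
import Mathlib
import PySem

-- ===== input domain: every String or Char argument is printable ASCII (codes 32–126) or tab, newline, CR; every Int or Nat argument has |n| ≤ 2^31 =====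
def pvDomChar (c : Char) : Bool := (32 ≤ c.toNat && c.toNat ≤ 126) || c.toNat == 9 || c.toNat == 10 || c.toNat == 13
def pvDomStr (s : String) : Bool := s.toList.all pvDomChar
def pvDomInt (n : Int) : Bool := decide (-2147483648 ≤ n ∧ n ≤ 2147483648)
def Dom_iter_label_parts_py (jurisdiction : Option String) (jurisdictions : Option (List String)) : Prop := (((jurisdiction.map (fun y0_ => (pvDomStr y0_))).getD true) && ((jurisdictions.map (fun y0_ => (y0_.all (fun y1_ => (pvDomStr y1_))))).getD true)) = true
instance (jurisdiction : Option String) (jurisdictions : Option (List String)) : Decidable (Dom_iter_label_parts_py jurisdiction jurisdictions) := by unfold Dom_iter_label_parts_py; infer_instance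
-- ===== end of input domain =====

-- B replaces A's nested per-block split loops (and the empty-block guard) by joining the
-- non-None blocks with ',' and tokenizing the combined string in one split-strip-filter pass.

-- ===== PORT A =====
-- literal port of _iter_label_parts: loop over [jurisdiction, *(jurisdictions or [])],
-- skip None, strip the block, skip if empty, inner loop over s.split(","), append non-empty stripped parts
def iter_label_parts_py (jurisdiction : Option String) (jurisdictions : Option (List String)) : List String :=
  (jurisdiction :: (jurisdictions.getD []).map some).foldl
    (fun out block =>
      match block with
      | none => out
      | some b =>
        let s := PySem.Chars.strip b.toList
        if s.isEmpty then out
        else (PySem.Chars.splitOn s [',']).foldl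
          (fun out part =>
            let p := PySem.Chars.strip part
            if p.isEmpty then out else out ++ [String.ofList p]) out) []

-- ===== PORT B =====
-- literal port of Source B: filter None out of the blocks, join with ',', split once, strip each token, keep the non-empty ones
def iter_label_parts_py_alt (jurisdiction : Option String) (jurisdictions : Option (List String)) : List String :=
  let blocks : List String := (match jurisdiction with | none => [] | some s => [s]) ++ jurisdictions.getD []
  let combined : List Char := PySem.Chars.join [','] (blocks.map String.toList)
  (((PySem.Chars.splitOn combined [',']).map PySem.Chars.strip).filter (fun t => !t.isEmpty)).map String.ofList

-- ===== PRECONDITION & SPEC =====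
def Spec_iter_label_parts_py (jurisdiction : Option String) (jurisdictions : Option (List String)) (out : List String) : Prop := out = iter_label_parts_py_alt jurisdiction jurisdictions
instance (jurisdiction : Option String) (jurisdictions : Option (List String)) (out : List String) : Decidable (Spec_iter_label_parts_py jurisdiction jurisdictions out) := by unfold Spec_iter_label_parts_py; infer_instance

-- ===== CLAIM (what is proved, stated in full; the proofs are below) =====
def Claim_equal_iter_label_parts_py : Prop := ∀ (jurisdiction : Option String) (jurisdictions : Option (List String)), Dom_iter_label_parts_py jurisdiction jurisdictions → Spec_iter_label_parts_py jurisdiction jurisdictions (iter_label_parts_py jurisdiction jurisdictions)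

-- ===== LEMMAS AND PROOFS =====

def pvSplitC : List Char → List (List Char)
  | [] => [[]]
  | c :: rest =>
    if c = ',' then [] :: pvSplitC rest
    else match pvSplitC rest with
      | [] => [[c]]
      | h :: t => (c :: h) :: t

def pvTok (cs : List Char) : List (List Char) :=
  ((pvSplitC cs).map PySem.Chars.strip).filter (fun t => !t.isEmpty)

theorem pvSplitC_ne_nil (cs : List Char) : pvSplitC cs ≠ [] := by
  cases cs with
  | nil => simp [pvSplitC]
  | cons c rest =>
    simp only [pvSplitC]
    split
    · simp
    · split <;> simp

theorem pvSplitOn_go_spec (fuel : Nat) : ∀ (l cur : List Char) (acc : List (List Char)),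
    l.length < fuel →
    PySem.Chars.splitOn.go [','] fuel l cur acc =
      acc.reverse ++ (match pvSplitC l with
        | [] => [cur.reverse]
        | h :: t => (cur.reverse ++ h) :: t) := by
  induction fuel with
  | zero => intro l cur acc h; omega
  | succ n ih =>
    intro l cur acc h
    cases l with
    | nil =>
      rw [PySem.Chars.splitOn.go]
      simp [pvSplitC]
      omega
    | cons c rest =>
      rw [PySem.Chars.splitOn.go]
      by_cases hc : c = ','
      · subst hc
        have hpre : [','].isPrefixOf (',' :: rest) = true := by
          simp [List.isPrefixOf]
        rw [if_pos hpre]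
        simp only [List.length_cons] at h
        simp only [show ([','] : List Char).length = 1 from rfl, List.drop_one, List.tail_cons]
        rw [ih rest [] (cur.reverse :: acc) (by omega)]
        obtain ⟨h1, t1, he⟩ := List.exists_cons_of_ne_nil (pvSplitC_ne_nil rest)
        simp [pvSplitC, he]
      · have hpre : [','].isPrefixOf (c :: rest) = false := by
          simp [List.isPrefixOf]
          exact fun h' => absurd h'.symm hc
        rw [if_neg (by simp [hpre])]
        simp only [List.length_cons] at h
        rw [ih rest (c :: cur) acc (by omega)]
        obtain ⟨h1, t1, he⟩ := List.exists_cons_of_ne_nil (pvSplitC_ne_nil rest)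
        simp [pvSplitC, he, hc]

theorem pvSplitOn_eq (cs : List Char) : PySem.Chars.splitOn cs [','] = pvSplitC cs := by
  rw [PySem.Chars.splitOn, pvSplitOn_go_spec (cs.length + 1) cs [] [] (by omega)]
  obtain ⟨h1, t1, he⟩ := List.exists_cons_of_ne_nil (pvSplitC_ne_nil cs)
  simp [he]

theorem pvSplitC_comma_append (a b : List Char) :
    pvSplitC (a ++ ',' :: b) = pvSplitC a ++ pvSplitC b := by
  induction a with
  | nil => simp [pvSplitC]
  | cons c a' ih =>
    by_cases hc : c = ','
    · subst hc; simp [pvSplitC, ih]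
    · obtain ⟨h1, t1, he⟩ := List.exists_cons_of_ne_nil (pvSplitC_ne_nil a')
      simp [pvSplitC, hc, ih, he]

theorem pvTok_join (bs : List (List Char)) (h : bs ≠ []) :
    pvTok (PySem.Chars.join [','] bs) = bs.flatMap pvTok := by
  induction bs with
  | nil => exact absurd rfl h
  | cons b bs' ih =>
    cases bs' with
    | nil => simp [PySem.Chars.join, List.intercalate, pvTok]
    | cons b2 t =>
      have hj : PySem.Chars.join [','] (b :: b2 :: t) = b ++ ',' :: PySem.Chars.join [','] (b2 :: t) := by
        simp [PySem.Chars.join, List.intercalate, List.intersperse]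
      rw [List.flatMap_cons, ← ih (by simp), hj]
      simp only [pvTok, pvSplitC_comma_append, List.map_append, List.filter_append]

theorem pvStrip_cons_ws (w : Char) (h : PySem.Chars.isspace w = true) (cs : List Char) :
    PySem.Chars.strip (w :: cs) = PySem.Chars.strip cs := by
  simp [PySem.Chars.strip, PySem.Chars.lstrip, List.dropWhile_cons_of_pos h]

theorem pvRstrip_snoc_ws (w : Char) (h : PySem.Chars.isspace w = true) (cs : List Char) :
    PySem.Chars.rstrip (cs ++ [w]) = PySem.Chars.rstrip cs := by
  simp [PySem.Chars.rstrip, List.dropWhile_cons_of_pos h]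

theorem pvStrip_snoc_ws (w : Char) (h : PySem.Chars.isspace w = true) (cs : List Char) :
    PySem.Chars.strip (cs ++ [w]) = PySem.Chars.strip cs := by
  by_cases hE : (List.dropWhile PySem.Chars.isspace cs).isEmpty = true
  · have h1 : List.dropWhile PySem.Chars.isspace cs = [] := by
      simpa [List.isEmpty_iff] using hE
    simp [PySem.Chars.strip, PySem.Chars.lstrip, List.dropWhile_append, h1,
      List.dropWhile_cons_of_pos h, PySem.Chars.rstrip]
  · rw [PySem.Chars.strip, PySem.Chars.strip, PySem.Chars.lstrip, PySem.Chars.lstrip,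
      List.dropWhile_append, if_neg hE]
    exact pvRstrip_snoc_ws w h _

theorem pvTok_cons_ws (w : Char) (h : PySem.Chars.isspace w = true) (cs : List Char) :
    pvTok (w :: cs) = pvTok cs := by
  have hw : w ≠ ',' := by rintro rfl; exact absurd h (by decide)
  obtain ⟨h1, t1, he⟩ := List.exists_cons_of_ne_nil (pvSplitC_ne_nil cs)
  simp [pvTok, pvSplitC, hw, he, pvStrip_cons_ws w h]

def pvSnocLast : List (List Char) → Char → List (List Char)
  | [], w => [[w]]
  | [h], w => [h ++ [w]]
  | h :: t, w => h :: pvSnocLast t w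

theorem pvSnocLast_cons (h : List Char) (t : List (List Char)) (w : Char) (ht : t ≠ []) :
    pvSnocLast (h :: t) w = h :: pvSnocLast t w := by
  cases t with
  | nil => exact absurd rfl ht
  | cons x xs => rfl

theorem pvSplitC_snoc (w : Char) (hw : w ≠ ',') (cs : List Char) :
    pvSplitC (cs ++ [w]) = pvSnocLast (pvSplitC cs) w := by
  induction cs with
  | nil => simp [pvSplitC, pvSnocLast, hw]
  | cons c cs' ih =>
    obtain ⟨h1, t1, he⟩ := List.exists_cons_of_ne_nil (pvSplitC_ne_nil cs')
    by_cases hc : c = ','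
    · subst hc
      rw [List.cons_append,
        show pvSplitC (',' :: (cs' ++ [w])) = [] :: pvSplitC (cs' ++ [w]) by simp [pvSplitC],
        show pvSplitC (',' :: cs') = [] :: pvSplitC cs' by simp [pvSplitC],
        pvSnocLast_cons _ _ _ (pvSplitC_ne_nil cs'), ih]
    · cases t1 with
      | nil => simp [pvSplitC, hc, ih, he, pvSnocLast]
      | cons x xs => simp [pvSplitC, hc, ih, he, pvSnocLast]

theorem pvMapStrip_snocLast (w : Char) (h : PySem.Chars.isspace w = true) :
    ∀ (l : List (List Char)), l ≠ [] →
    (pvSnocLast l w).map PySem.Chars.strip = l.map PySem.Chars.strip := by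
  intro l
  induction l with
  | nil => intro h'; exact absurd rfl h'
  | cons x t ih =>
    intro _
    cases t with
    | nil => simp [pvSnocLast, pvStrip_snoc_ws w h]
    | cons y ys => simp only [pvSnocLast, List.map_cons, ih (by simp)]

theorem pvTok_snoc_ws (w : Char) (h : PySem.Chars.isspace w = true) (cs : List Char) :
    pvTok (cs ++ [w]) = pvTok cs := by
  have hw : w ≠ ',' := by rintro rfl; exact absurd h (by decide)
  rw [pvTok, pvSplitC_snoc w hw, pvMapStrip_snocLast w h _ (pvSplitC_ne_nil cs), pvTok]

theorem pvTok_ws_append (ws cs : List Char) (h : ws.all PySem.Chars.isspace = true) :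
    pvTok (ws ++ cs) = pvTok cs := by
  induction ws with
  | nil => simp
  | cons w ws' ih =>
    simp only [List.all_cons, Bool.and_eq_true] at h
    rw [List.cons_append, pvTok_cons_ws w h.1, ih h.2]

theorem pvTok_append_ws (ws : List Char) (h : ws.all PySem.Chars.isspace = true) :
    ∀ cs, pvTok (cs ++ ws) = pvTok cs := by
  induction ws with
  | nil => simp
  | cons w ws' ih =>
    intro cs
    simp only [List.all_cons, Bool.and_eq_true] at h
    rw [show cs ++ w :: ws' = (cs ++ [w]) ++ ws' by simp, ih h.2, pvTok_snoc_ws w h.1]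

theorem pvStrip_decomp (cs : List Char) :
    cs = cs.takeWhile PySem.Chars.isspace ++
      (PySem.Chars.strip cs ++
        ((List.dropWhile PySem.Chars.isspace cs).reverse.takeWhile PySem.Chars.isspace).reverse) := by
  conv_lhs => rw [← List.takeWhile_append_dropWhile (p := PySem.Chars.isspace) (l := cs)]
  congr 1
  conv_lhs => rw [← List.reverse_reverse (List.dropWhile PySem.Chars.isspace cs),
    ← List.takeWhile_append_dropWhile (p := PySem.Chars.isspace)
      (l := (List.dropWhile PySem.Chars.isspace cs).reverse)]
  rw [List.reverse_append]
  congr 1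

theorem pvTok_strip (cs : List Char) : pvTok (PySem.Chars.strip cs) = pvTok cs := by
  have hall1 : (cs.takeWhile PySem.Chars.isspace).all PySem.Chars.isspace = true := by
    simp only [List.all_eq_true]
    exact fun a ha => List.mem_takeWhile_imp ha
  have hall2 : (((List.dropWhile PySem.Chars.isspace cs).reverse.takeWhile
      PySem.Chars.isspace).reverse).all PySem.Chars.isspace = true := by
    simp only [List.all_eq_true]
    exact fun a ha => List.mem_takeWhile_imp (List.mem_reverse.mp ha)
  conv_rhs => rw [pvStrip_decomp cs]
  rw [pvTok_ws_append _ _ hall1, pvTok_append_ws _ hall2]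

theorem pvInner (s : List Char) (out0 : List String) :
    (PySem.Chars.splitOn s [',']).foldl
      (fun out part =>
        let p := PySem.Chars.strip part
        if p.isEmpty then out else out ++ [String.ofList p]) out0
    = out0 ++ (pvTok s).map String.ofList := by
  rw [pvSplitOn_eq]
  have hb : (fun (out : List String) (part : List Char) =>
      let p := PySem.Chars.strip part
      if p.isEmpty then out else out ++ [String.ofList p])
    = fun out part => if (!(PySem.Chars.strip part).isEmpty) = true
        then out ++ [String.ofList (PySem.Chars.strip part)] else out := by
    funext out part
    by_cases hp : (PySem.Chars.strip part).isEmpty <;> simp [hp]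
  rw [hb, PySem.List.foldl_append_if (fun part => !(PySem.Chars.strip part).isEmpty)
      (fun part => String.ofList (PySem.Chars.strip part)) (pvSplitC s) out0]
  rw [pvTok, List.filter_map, List.map_map]
  rfl

theorem pvTok_of_strip_empty (b : List Char) (hE : (PySem.Chars.strip b).isEmpty = true) :
    pvTok b = [] := by
  rw [← pvTok_strip]
  have h0 : PySem.Chars.strip b = [] := by simpa [List.isEmpty_iff] using hE
  rw [h0]
  rfl

theorem pvA_eq (j : Option String) (js : Option (List String)) :
    iter_label_parts_py j js
      = (j :: (js.getD []).map some).flatMap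
          (fun block => match block with
            | none => []
            | some b => (pvTok b.toList).map String.ofList) := by
  unfold iter_label_parts_py
  have hb : (fun (out : List String) (block : Option String) =>
      match block with
      | none => out
      | some b =>
        let s := PySem.Chars.strip b.toList
        if s.isEmpty then out
        else (PySem.Chars.splitOn s [',']).foldl
          (fun out part =>
            let p := PySem.Chars.strip part
            if p.isEmpty then out else out ++ [String.ofList p]) out)
    = fun out block => out ++ (match block with
        | none => []
        | some b => (pvTok b.toList).map String.ofList) := by
    funext out block
    cases block with
    | none => simp
    | some b =>
      simp only
      by_cases hE : (PySem.Chars.strip b.toList).isEmpty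
      · rw [if_pos hE, pvTok_of_strip_empty _ hE]
        simp
      · rw [if_neg hE, pvInner, pvTok_strip]
  rw [hb, PySem.List.foldl_append_eq_flatMap]
  simp

theorem pvB_tok (j : Option String) (js : Option (List String)) :
    iter_label_parts_py_alt j js
      = ((pvTok (PySem.Chars.join [',']
          (((match j with | none => [] | some s => [s]) ++ js.getD []).map String.toList)))).map
            String.ofList := by
  simp only [iter_label_parts_py_alt, pvSplitOn_eq]
  rfl

theorem pvB_eq (j : Option String) (js : Option (List String)) :
    iter_label_parts_py_alt j js
      = ((match j with | none => [] | some s => [s]) ++ js.getD []).flatMap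
          (fun b => (pvTok b.toList).map String.ofList) := by
  rw [pvB_tok]
  cases j with
  | some s =>
    rw [pvTok_join _ (by simp)]
    simp [List.flatMap_map, List.map_flatMap]
  | none =>
    by_cases hbs : js.getD [] = []
    · rw [hbs]
      simp [PySem.Chars.join, List.intercalate, pvTok, pvSplitC,
        PySem.Chars.strip, PySem.Chars.lstrip, PySem.Chars.rstrip]
    · rw [show ((match (none : Option String) with | none => ([] : List String) | some s => [s]) ++ js.getD []) = js.getD [] by simp,
        pvTok_join _ (by simpa using hbs)]
      simp [List.flatMap_map, List.map_flatMap]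

theorem pvFinal (j : Option String) (js : Option (List String)) :
    iter_label_parts_py j js = iter_label_parts_py_alt j js := by
  rw [pvA_eq, pvB_eq]
  cases j <;> simp [List.flatMap_map]

-- ===== VERDICT (by name: the statement is the Claim_ definition above) =====
theorem iter_label_parts_py_spec : Claim_equal_iter_label_parts_py := by
  intro jurisdiction jurisdictions _
  unfold Spec_iter_label_parts_py
  exact pvFinal jurisdiction jurisdictions
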